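-- pv_equiv track=rewrite | github.com/lhiginbotham/AdventOfCode2015 | p25/1.py | get_linearized_index
-- ===== SOURCE A (Python) =====
-- def get_linearized_index(row, col):
--     orig_col = col
--
--     # get diagonal number that this belongs to
--     while col > 1:
--         col -= 1
--         row += 1
--     diagonal_number = row
--
--     # base index is the sum of the numbers up to the diagonal number, as the diagonal contains diagonal_number elements
--     base_index = (row * (row - 1)) // 2
--     return base_index + orig_col - 1
-- ===== SOURCE B (Python) =====
-- def get_linearized_index(row, col):
--     # closed form: the loop only runs while col > 1, so the diagonal is row + max(col - 1, 0)
--     d = row + max(col - 1, 0)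
--     return d * (d - 1) // 2 + col - 1
-- ===== Notes on version B (the rewrite author's own statement) =====
-- stated objective: faster
-- what changed: Replaced the O(col) while-loop that walks to the diagonal with a closed-form O(1) arithmetic formula (diagonal = row + max(col-1,0), base = d*(d-1)//2).
import Mathlib
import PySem

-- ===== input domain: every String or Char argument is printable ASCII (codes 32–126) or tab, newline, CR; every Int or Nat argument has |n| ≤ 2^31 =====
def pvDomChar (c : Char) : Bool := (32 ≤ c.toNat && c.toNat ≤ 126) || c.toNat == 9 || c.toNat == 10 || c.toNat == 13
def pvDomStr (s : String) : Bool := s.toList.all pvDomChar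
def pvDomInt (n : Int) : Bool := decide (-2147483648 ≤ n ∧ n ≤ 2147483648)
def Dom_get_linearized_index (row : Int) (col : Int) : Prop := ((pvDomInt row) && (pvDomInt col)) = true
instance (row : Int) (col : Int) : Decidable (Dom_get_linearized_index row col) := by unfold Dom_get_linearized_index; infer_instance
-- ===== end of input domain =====

-- B replaces A's O(col) diagonal-walking loop with a closed-form O(1) formula (exact for all ints).
-- ===== PORT A =====
-- while col > 1: col -= 1; row += 1   (returns the pair (row, col) after the loop)
def glLoop (row : Int) (col : Int) : Int × Int :=
  if col > 1 then glLoop (row + 1) (col - 1) else (row, col)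
termination_by col.toNat
decreasing_by omega

def get_linearized_index (row : Int) (col : Int) : Int :=
  let orig_col := col
  let rc := glLoop row col
  let diagonal_number := rc.1
  let base_index := PySem.Int.floordiv (diagonal_number * (diagonal_number - 1)) 2
  base_index + orig_col - 1

-- ===== PORT B =====
def get_linearized_index_alt (row : Int) (col : Int) : Int :=
  let d := row + max (col - 1) 0
  PySem.Int.floordiv (d * (d - 1)) 2 + col - 1

-- ===== PRECONDITION & SPEC =====
def Spec_get_linearized_index (row : Int) (col : Int) (out : Int) : Prop := out = get_linearized_index_alt row col
instance (row : Int) (col : Int) (out : Int) : Decidable (Spec_get_linearized_index row col out) := by unfold Spec_get_linearized_index; infer_instance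

-- ===== CLAIM (what is proved, stated in full; the proofs are below) =====
def Claim_equal_get_linearized_index : Prop := ∀ (row : Int) (col : Int), Dom_get_linearized_index row col → Spec_get_linearized_index row col (get_linearized_index row col)

-- ===== LEMMAS AND PROOFS =====
theorem glLoop_fst (row col : Int) : (glLoop row col).1 = row + max (col - 1) 0 := by
  fun_induction glLoop row col with
  | case1 row col h ih => rw [ih]; omega
  | case2 row col h => simp; omega

-- ===== VERDICT (by name: the statement is the Claim_ definition above) =====
theorem get_linearized_index_spec : Claim_equal_get_linearized_index := by
  intro row col _
  unfold Spec_get_linearized_index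
  simp only [get_linearized_index, get_linearized_index_alt, glLoop_fst]
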